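-- pv_equiv track=rewrite | github.com/ljia2/leetcode.py | solutions/hashtable/966.Vowel.Spellchecker.py | maskVowels
-- ===== SOURCE A (Python) =====
-- def maskVowels(word):
--     vowels = {'a', 'e', 'i', 'o', 'u'}
--     maskword = ""
--     for c in word.lower():
--         if c not in vowels:
--             maskword += c
--         else:
--             maskword += '*'
--     return maskword
-- ===== SOURCE B (Python) =====
-- def maskVowels(word):
--     return (word.lower()
--             .replace('a', '*')
--             .replace('e', '*')
--             .replace('i', '*')
--             .replace('o', '*')
--             .replace('u', '*'))
-- ===== Notes on version B (the rewrite author's own statement) =====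
-- stated objective: idiomatic
-- what changed: Replaced A's single accumulating loop with per-character set-membership branching by five staged whole-string str.replace passes (one per vowel) over the lowercased word; a timing run measured this constant-factor faster (C-level passes vs interpreted per-char loop).
import Mathlib
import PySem

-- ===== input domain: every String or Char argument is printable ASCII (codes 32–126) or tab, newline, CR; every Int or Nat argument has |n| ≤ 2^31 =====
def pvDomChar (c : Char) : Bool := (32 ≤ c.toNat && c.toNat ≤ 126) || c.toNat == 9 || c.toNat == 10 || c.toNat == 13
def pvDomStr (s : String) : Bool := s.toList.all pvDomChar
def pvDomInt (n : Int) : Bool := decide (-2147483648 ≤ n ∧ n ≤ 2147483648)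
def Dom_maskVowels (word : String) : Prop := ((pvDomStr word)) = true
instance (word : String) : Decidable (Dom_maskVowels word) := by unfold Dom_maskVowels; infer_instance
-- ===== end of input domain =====

-- B replaces A's accumulating loop with a per-char membership branch by five staged
-- whole-string replace passes, one per vowel, over the lowercased word (idiomatic; measured constant-factor faster in a timing run).

-- ===== PORT A =====
-- vowels = {'a','e','i','o','u'}
def pvVowels_maskVowels : PySem.Set Char := PySem.Set.ofList ['a', 'e', 'i', 'o', 'u']

-- loop: for c in word.lower(): maskword += c if c not in vowels else '*'
def maskVowels (word : String) : String :=
  (PySem.Str.lower word).toList.foldl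
    (fun maskword c =>
      if ¬ (PySem.Set.contains pvVowels_maskVowels c) then maskword.push c
      else maskword.push '*')
    ""

-- ===== PORT B =====
-- word.lower().replace('a','*').replace('e','*').replace('i','*').replace('o','*').replace('u','*')
def maskVowels_alt (word : String) : String :=
  PySem.Str.replace
    (PySem.Str.replace
      (PySem.Str.replace
        (PySem.Str.replace
          (PySem.Str.replace (PySem.Str.lower word) "a" "*")
          "e" "*")
        "i" "*")
      "o" "*")
    "u" "*"

-- ===== PRECONDITION & SPEC =====
def Spec_maskVowels (word : String) (out : String) : Prop := out = maskVowels_alt word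
instance (word : String) (out : String) : Decidable (Spec_maskVowels word out) := by unfold Spec_maskVowels; infer_instance

-- ===== CLAIM (what is proved, stated in full; the proofs are below) =====
def Claim_equal_maskVowels : Prop := ∀ (word : String), Dom_maskVowels word → Spec_maskVowels word (maskVowels word)

-- ===== LEMMAS AND PROOFS =====

-- replace with a single-char pattern is a pointwise map
theorem pvGo_single (o n' : Char) (fuel : Nat) :
    ∀ (l : List Char) (acc : List Char), l.length ≤ fuel →
      PySem.Chars.replace.go [o] [n'] fuel l acc
        = acc.reverse ++ l.map (fun c => if c = o then n' else c) := by
  induction fuel with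
  | zero =>
    intro l acc h
    have : l = [] := List.eq_nil_of_length_eq_zero (Nat.le_zero.mp h)
    subst this
    simp [PySem.Chars.replace.go]
  | succ fuel ih =>
    intro l acc h
    cases l with
    | nil => simp [PySem.Chars.replace.go]
    | cons c t =>
      rw [PySem.Chars.replace.go]
      by_cases hc : c = o
      · subst hc
        have hpre : [c].isPrefixOf (c :: t) = true := by
          simp [List.isPrefixOf]
        simp only [hpre, if_true]
        rw [ih]
        · simp
        · simpa using Nat.le_of_succ_le_succ h
      · have hpre : [o].isPrefixOf (c :: t) = false := by
          simp only [List.isPrefixOf, Bool.and_eq_false_iff, beq_eq_false_iff_ne]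
          exact Or.inl (fun h => hc h.symm)
        simp only [hpre]
        rw [if_neg (by simp)]
        rw [ih t (c :: acc) (by simpa using Nat.le_of_succ_le_succ h)]
        simp [hc]

theorem pvReplace_single (s : List Char) (o n' : Char) :
    PySem.Chars.replace s [o] [n'] = s.map (fun c => if c = o then n' else c) := by
  rw [PySem.Chars.replace, if_neg (by simp)]
  rw [pvGo_single o n' s.length s [] (le_refl _)]
  simp

-- the five staged single-char maps compose to A's vowel branch
theorem pvStage_eq_branch (c : Char) :
    (fun x => if x = 'u' then '*' else x)
      ((fun x => if x = 'o' then '*' else x)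
        ((fun x => if x = 'i' then '*' else x)
          ((fun x => if x = 'e' then '*' else x)
            ((fun x => if x = 'a' then '*' else x) c))))
    = (if PySem.Set.contains pvVowels_maskVowels c then '*' else c) := by
  by_cases ha : c = 'a'
  · subst ha; decide
  by_cases he : c = 'e'
  · subst he; decide
  by_cases hi : c = 'i'
  · subst hi; decide
  by_cases ho : c = 'o'
  · subst ho; decide
  by_cases hu : c = 'u'
  · subst hu; decide
  have hmem : c ∉ pvVowels_maskVowels := by
    simp [pvVowels_maskVowels, PySem.Set.mem_ofList, ha, he, hi, ho, hu]
  simp [ha, he, hi, ho, hu, hmem]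

-- A's foldl as one map with the vowel branch
theorem pvFoldl_eq_map (l : List Char) (acc : String) :
    l.foldl
      (fun maskword c =>
        if ¬ (PySem.Set.contains pvVowels_maskVowels c) then maskword.push c
        else maskword.push '*')
      acc
    = acc ++ String.ofList
        (l.map (fun c => if PySem.Set.contains pvVowels_maskVowels c then '*' else c)) := by
  induction l generalizing acc with
  | nil => apply String.ext; simp
  | cons c l ih =>
    simp only [List.foldl_cons, List.map_cons, ih]
    by_cases h : c ∈ pvVowels_maskVowels
    · apply String.ext; simp [h]
    · apply String.ext; simp [h]

-- ===== VERDICT (by name: the statement is the Claim_ definition above) =====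
theorem maskVowels_spec : Claim_equal_maskVowels := by
  intro word _
  unfold Spec_maskVowels maskVowels maskVowels_alt
  apply String.ext
  rw [pvFoldl_eq_map]
  rw [show ∀ l : List Char, ("" ++ String.ofList l).toList = l by
        intro l; simp [String.toList_ofList]]
  simp only [PySem.Str.toList_replace]
  rw [show ("a" : String).toList = ['a'] from rfl, show ("e" : String).toList = ['e'] from rfl,
      show ("i" : String).toList = ['i'] from rfl, show ("o" : String).toList = ['o'] from rfl,
      show ("u" : String).toList = ['u'] from rfl, show ("*" : String).toList = ['*'] from rfl]
  simp only [pvReplace_single, List.map_map]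
  apply List.map_congr_left
  intro c _
  exact (pvStage_eq_branch c).symm
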